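-- pv_equiv track=rewrite | github.com/mofa-org/mofaclaw | mofa-effect/comp/comp_modifier.py | _expand_new_values
-- ===== SOURCE A (Python) =====
-- def _expand_new_values(new_value_str, current_values):
--     parts = [p.strip() for p in new_value_str.split(" / ") if p.strip()]
--     if not parts:
--         parts = [new_value_str]
--     n = max(len(current_values), 1)
--     if len(parts) < n:
--         parts = parts + [parts[-1]] * (n - len(parts))
--     return parts[:n] if len(parts) > n else parts
-- ===== SOURCE B (Python) =====
-- def _expand_new_values(new_value_str, current_values):
--     parts = [p.strip() for p in new_value_str.split(" / ") if p.strip()] or [new_value_str]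
--     out = []
--     it = iter(parts)
--     cur = next(it)
--     for _ in range(max(len(current_values), 1)):
--         out.append(cur)
--         cur = next(it, cur)
--     return out
-- ===== Notes on version B (the rewrite author's own statement) =====
-- stated objective: alternative
-- what changed: A pads the parts list with copies of its last element and then truncates with branches; B never builds a padded list: it consumes parts as an iterator in one forward pass over range(n), emitting a sticky cursor that is advanced with next(it, cur) and so freezes on the last part when the iterator runs out.
import Mathlib
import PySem

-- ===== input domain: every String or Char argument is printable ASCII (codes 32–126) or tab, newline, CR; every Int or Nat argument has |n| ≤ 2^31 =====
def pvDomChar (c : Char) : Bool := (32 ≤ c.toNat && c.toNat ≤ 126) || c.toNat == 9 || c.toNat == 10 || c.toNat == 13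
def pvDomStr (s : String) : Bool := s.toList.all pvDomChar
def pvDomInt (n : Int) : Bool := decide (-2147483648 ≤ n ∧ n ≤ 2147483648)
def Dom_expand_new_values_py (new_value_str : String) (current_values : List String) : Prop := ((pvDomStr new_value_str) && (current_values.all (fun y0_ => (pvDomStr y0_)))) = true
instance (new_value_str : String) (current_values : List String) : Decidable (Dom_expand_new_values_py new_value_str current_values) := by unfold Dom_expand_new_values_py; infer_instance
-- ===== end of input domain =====

-- B replaces A's pad-then-truncate list surgery by a single forward pass that consumes the parts
-- as a stream with a sticky cursor (alternative decomposition, same cost).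

-- ===== PORT A =====
def expand_new_values_py (new_value_str : String) (current_values : List String) : List String :=
  -- new_value_str.split(" / "): sep is a non-empty literal, so split? is always some
  let pieces := (PySem.Str.split? new_value_str " / ").getD []
  let parts0 := (pieces.map PySem.Str.strip).filter (fun p => p ≠ "")
  let parts := if parts0 = [] then [new_value_str] else parts0
  let n := max current_values.length 1
  let parts2 := if parts.length < n then parts ++ List.replicate (n - parts.length) (PySem.List.pyGetD parts (-1) "") else parts
  if parts2.length > n then parts2.take n else parts2

-- ===== PORT B =====
-- the for-loop of Source B: emit `cur` n times, advancing the cursor with next(it, cur)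
-- (cursor sticks once the iterator `rest` is exhausted)
def expandGo : Nat → String → List String → List String
  | 0, _, _ => []
  | n + 1, cur, [] => cur :: expandGo n cur []
  | n + 1, cur, x :: xs => cur :: expandGo n x xs

def expand_new_values_py_alt (new_value_str : String) (current_values : List String) : List String :=
  let pieces := (PySem.Str.split? new_value_str " / ").getD []
  let parts0 := (pieces.map PySem.Str.strip).filter (fun p => p ≠ "")
  let parts := if parts0 = [] then [new_value_str] else parts0
  -- cur = next(it); the loop runs max(len(current_values), 1) times
  match parts with
  | [] => []  -- unreachable: parts is never empty
  | c :: rest => expandGo (max current_values.length 1) c rest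

-- ===== PRECONDITION & SPEC =====
def Spec_expand_new_values_py (new_value_str : String) (current_values : List String) (out : List String) : Prop := out = expand_new_values_py_alt new_value_str current_values
instance (new_value_str : String) (current_values : List String) (out : List String) : Decidable (Spec_expand_new_values_py new_value_str current_values out) := by unfold Spec_expand_new_values_py; infer_instance

-- ===== CLAIM =====
def Claim_equal_expand_new_values_py : Prop := ∀ (new_value_str : String) (current_values : List String), Dom_expand_new_values_py new_value_str current_values → Spec_expand_new_values_py new_value_str current_values (expand_new_values_py new_value_str current_values)

-- ===== LEMMAS AND PROOFS =====

-- characterisation of B's sticky-cursor loop by a clamped index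
theorem expandGo_eq_range (n : Nat) (cur : String) (rest : List String) :
    expandGo n cur rest
    = (List.range n).map (fun i => (cur :: rest).getD (min i rest.length) "") := by
  induction n generalizing cur rest with
  | zero => simp [expandGo]
  | succ n ih =>
    rw [List.range_succ_eq_map]
    cases rest with
    | nil =>
      simp only [expandGo, ih, List.map_cons, List.map_map]
      refine congrArg₂ _ rfl (List.map_congr_left fun k _ => ?_)
      simp
    | cons x xs =>
      simp only [expandGo, ih, List.map_cons, List.map_map]
      refine congrArg₂ _ rfl (List.map_congr_left fun k _ => ?_)
      simp only [Function.comp_apply, List.length_cons]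
      rw [show min (k + 1) (xs.length + 1) = (min k xs.length) + 1 from by omega]
      rfl

-- core lemma: A's pad/truncate on a nonempty list equals the clamped-index construction
theorem pad_truncate_eq_clamp (parts : List String) (hne : parts ≠ []) (n : Nat) :
    (let parts2 := if parts.length < n then parts ++ List.replicate (n - parts.length) (PySem.List.pyGetD parts (-1) "") else parts;
     if parts2.length > n then parts2.take n else parts2)
    = (List.range n).map (fun i => parts.getD (min i (parts.length - 1)) "") := by
  have hlen : 0 < parts.length := List.length_pos_iff.mpr hne
  by_cases h : parts.length < n
  · have e1 : (let parts2 := if parts.length < n then parts ++ List.replicate (n - parts.length) (PySem.List.pyGetD parts (-1) "") else parts;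
        if parts2.length > n then parts2.take n else parts2)
        = parts ++ List.replicate (n - parts.length) (PySem.List.pyGetD parts (-1) "") := by
      rw [if_pos h]
      rw [if_neg (by simp only [List.length_append, List.length_replicate]; omega)]
    rw [e1]
    apply List.ext_getElem
    · simp; omega
    · intro i h1 h2
      simp only [List.length_append, List.length_replicate] at h1
      simp only [List.length_map, List.length_range] at h2
      simp only [List.getElem_map, List.getElem_range]
      by_cases hip : i < parts.length
      · rw [List.getElem_append_left hip,
          show min i (parts.length - 1) = i from by omega,
          List.getD_eq_getElem _ _ (by omega)]
      · rw [List.getElem_append_right (by omega), List.getElem_replicate,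
          PySem.List.pyGetD_neg_one _ _ hne,
          show min i (parts.length - 1) = parts.length - 1 from by omega,
          List.getD_eq_getElem _ _ (by omega), List.getLast_eq_getElem]
  · have e2 : (let parts2 := if parts.length < n then parts ++ List.replicate (n - parts.length) (PySem.List.pyGetD parts (-1) "") else parts;
        if parts2.length > n then parts2.take n else parts2)
        = parts.take n := by
      rw [if_neg h]
      by_cases hg : parts.length > n
      · rw [if_pos hg]
      · rw [if_neg hg, List.take_of_length_le (by omega)]
    rw [e2]
    apply List.ext_getElem
    · simp; omega
    · intro i h1 h2
      simp only [List.length_take] at h1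
      simp only [List.length_map, List.length_range] at h2
      simp only [List.getElem_map, List.getElem_range, List.getElem_take]
      rw [show min i (parts.length - 1) = i from by omega,
        List.getD_eq_getElem _ _ (by omega)]

-- ===== VERDICT =====
theorem expand_combined (parts : List String) (n : Nat) :
    parts ≠ [] →
    (let parts2 := if parts.length < n then parts ++ List.replicate (n - parts.length) (PySem.List.pyGetD parts (-1) "") else parts;
     if parts2.length > n then parts2.take n else parts2)
    = match parts with | [] => ([] : List String) | c :: rest => expandGo n c rest := by
  intro hne
  cases parts with
  | nil => exact absurd rfl hne
  | cons c rest =>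
    show _ = expandGo n c rest
    rw [expandGo_eq_range, pad_truncate_eq_clamp _ hne n]
    simp

theorem expand_new_values_py_spec : Claim_equal_expand_new_values_py := by
  intro s cv _
  show expand_new_values_py s cv = expand_new_values_py_alt s cv
  have hne : (if (((PySem.Str.split? s " / ").getD []).map PySem.Str.strip).filter (fun p => p ≠ "") = []
      then [s] else (((PySem.Str.split? s " / ").getD []).map PySem.Str.strip).filter (fun p => p ≠ "")) ≠ [] := by
    split
    · simp
    · assumption
  exact expand_combined _ (max cv.length 1) hne
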